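-- pv_equiv track=rewrite | github.com/CanineSatsuma6/AdventOfCode | Python/2023/19/2.py | groupConditionsByAttribute
-- ===== SOURCE A (Python) =====
-- def groupConditionsByAttribute(compoundConditions: list[str]):
--     groups = []
--
--     for path in compoundConditions:
--         parts = path.split(' and ')
--         s = [expression for expression in parts if expression.startswith('s')]
--         x = [expression for expression in parts if expression.startswith('x')]
--         a = [expression for expression in parts if expression.startswith('a')]
--         m = [expression for expression in parts if expression.startswith('m')]
--
--         groups.append((' and '.join(s), ' and '.join(x), ' and '.join(a), ' and '.join(m)))
--
--     return groups
-- ===== SOURCE B (Python) =====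
-- def groupConditionsByAttribute(compoundConditions: list[str]):
--     groups = []
--     for path in compoundConditions:
--         s, x, a, m = [], [], [], []
--         for e in path.split(' and '):
--             c = e[:1]
--             if c == 's':
--                 s.append(e)
--             elif c == 'x':
--                 x.append(e)
--             elif c == 'a':
--                 a.append(e)
--             elif c == 'm':
--                 m.append(e)
--         groups.append((' and '.join(s), ' and '.join(x), ' and '.join(a), ' and '.join(m)))
--     return groups
-- ===== Notes on version B (the rewrite author's own statement) =====
-- stated objective: faster
-- what changed: Replaces A's four independent filter passes over the split parts by one dispatch pass that routes each expression by its first character into one of four accumulators.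
import Mathlib
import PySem

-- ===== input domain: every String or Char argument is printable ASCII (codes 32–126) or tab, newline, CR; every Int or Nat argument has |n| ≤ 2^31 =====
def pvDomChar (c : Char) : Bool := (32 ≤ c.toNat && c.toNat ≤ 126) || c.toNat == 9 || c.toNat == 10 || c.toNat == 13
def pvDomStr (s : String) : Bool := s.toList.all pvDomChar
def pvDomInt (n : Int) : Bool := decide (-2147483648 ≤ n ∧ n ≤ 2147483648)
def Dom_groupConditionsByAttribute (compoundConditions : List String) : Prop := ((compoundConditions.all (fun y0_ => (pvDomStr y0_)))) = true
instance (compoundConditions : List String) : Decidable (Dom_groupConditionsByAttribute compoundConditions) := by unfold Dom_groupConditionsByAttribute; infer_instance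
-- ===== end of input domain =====

-- B replaces A's four filter passes per path by ONE dispatch pass routing each
-- expression by its first character into four accumulators (objective: alternative).

-- ===== PORT A =====
-- four independent filters per path, then joins
def groupConditionsByAttribute (compoundConditions : List String) : List (String × String × String × String) :=
  compoundConditions.foldl (fun groups path =>
    -- path.split(' and '); separator is a nonempty literal, so split? is always some
    let parts := (PySem.Str.split? path " and ").getD []
    let s := parts.filter (fun e => PySem.Str.startswith e "s")
    let x := parts.filter (fun e => PySem.Str.startswith e "x")
    let a := parts.filter (fun e => PySem.Str.startswith e "a")
    let m := parts.filter (fun e => PySem.Str.startswith e "m")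
    groups ++ [(PySem.Str.join " and " s, PySem.Str.join " and " x,
                PySem.Str.join " and " a, PySem.Str.join " and " m)]) []

-- ===== PORT B =====
-- one dispatch step: c = e[:1] (exact: take 1 of the char list), appended to the matching bucket
def pvAltStep (acc : List String × List String × List String × List String) (e : String) :
    List String × List String × List String × List String :=
  let c := e.toList.take 1
  if c = ['s'] then (acc.1 ++ [e], acc.2.1, acc.2.2.1, acc.2.2.2)
  else if c = ['x'] then (acc.1, acc.2.1 ++ [e], acc.2.2.1, acc.2.2.2)
  else if c = ['a'] then (acc.1, acc.2.1, acc.2.2.1 ++ [e], acc.2.2.2)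
  else if c = ['m'] then (acc.1, acc.2.1, acc.2.2.1, acc.2.2.2 ++ [e])
  else acc

def groupConditionsByAttribute_alt (compoundConditions : List String) : List (String × String × String × String) :=
  compoundConditions.foldl (fun groups path =>
    let b := ((PySem.Str.split? path " and ").getD []).foldl pvAltStep ([], [], [], [])
    groups ++ [(PySem.Str.join " and " b.1, PySem.Str.join " and " b.2.1,
                PySem.Str.join " and " b.2.2.1, PySem.Str.join " and " b.2.2.2)]) []

-- ===== PRECONDITION & SPEC =====
def Spec_groupConditionsByAttribute (compoundConditions : List String) (out : List (String × String × String × String)) : Prop := out = groupConditionsByAttribute_alt compoundConditions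
instance (compoundConditions : List String) (out : List (String × String × String × String)) : Decidable (Spec_groupConditionsByAttribute compoundConditions out) := by unfold Spec_groupConditionsByAttribute; infer_instance

-- ===== CLAIM (what is proved, stated in full; the proofs are below) =====
def Claim_equal_groupConditionsByAttribute : Prop := ∀ (compoundConditions : List String), Dom_groupConditionsByAttribute compoundConditions → Spec_groupConditionsByAttribute compoundConditions (groupConditionsByAttribute compoundConditions)

-- ===== LEMMAS AND PROOFS =====

-- a one-character startswith test is the "first character equals c" test B dispatches on
theorem pv_startswith_single (l : List Char) (c : Char) :
    (PySem.Chars.startswith l [c] = true) ↔ l.take 1 = [c] := by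
  rw [PySem.Chars.startswith_iff]
  cases l with
  | nil => simp
  | cons h t => simp [List.cons_prefix_cons, eq_comm]

-- B's single dispatch pass computes exactly A's four filters
theorem pv_fold_eq_filters (parts : List String) (s x a m : List String) :
    parts.foldl pvAltStep (s, x, a, m) =
      (s ++ parts.filter (fun e => PySem.Str.startswith e "s"),
       x ++ parts.filter (fun e => PySem.Str.startswith e "x"),
       a ++ parts.filter (fun e => PySem.Str.startswith e "a"),
       m ++ parts.filter (fun e => PySem.Str.startswith e "m")) := by
  induction parts generalizing s x a m with
  | nil => simp
  | cons e rest ih =>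
    have hs := pv_startswith_single e.toList 's'
    have hx := pv_startswith_single e.toList 'x'
    have ha := pv_startswith_single e.toList 'a'
    have hm := pv_startswith_single e.toList 'm'
    simp only [List.foldl_cons, List.filter_cons, pvAltStep,
      PySem.Str.startswith_eq]
    split_ifs <;> simp_all [ih, List.append_assoc]

-- a fold that only appends a singleton per element is the map
theorem pv_foldl_append_map {α β : Type} (f : α → β) (xs : List α) (init : List β) :
    xs.foldl (fun g p => g ++ [f p]) init = init ++ xs.map f := by
  induction xs generalizing init with
  | nil => simp
  | cons h t ih => simp [ih]

-- ===== VERDICT (by name: the statement is the Claim_ definition above) =====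
theorem groupConditionsByAttribute_spec : Claim_equal_groupConditionsByAttribute := by
  intro cc _
  unfold Spec_groupConditionsByAttribute groupConditionsByAttribute groupConditionsByAttribute_alt
  rw [pv_foldl_append_map
        (f := fun path =>
          let parts := (PySem.Str.split? path " and ").getD []
          (PySem.Str.join " and " (parts.filter (fun e => PySem.Str.startswith e "s")),
           PySem.Str.join " and " (parts.filter (fun e => PySem.Str.startswith e "x")),
           PySem.Str.join " and " (parts.filter (fun e => PySem.Str.startswith e "a")),
           PySem.Str.join " and " (parts.filter (fun e => PySem.Str.startswith e "m")))),
      pv_foldl_append_map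
        (f := fun path =>
          let b := ((PySem.Str.split? path " and ").getD []).foldl pvAltStep ([], [], [], [])
          (PySem.Str.join " and " b.1, PySem.Str.join " and " b.2.1,
           PySem.Str.join " and " b.2.2.1, PySem.Str.join " and " b.2.2.2))]
  simp [pv_fold_eq_filters]
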